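-- pv_equiv track=rewrite | github.com/Spacider/Exercise_pre_final | pre-final/exercise5.py | longest_leftmost_sequence_of_consecutive_letters
-- ===== SOURCE A (Python) =====
-- def longest_leftmost_sequence_of_consecutive_letters(word):
--     '''
--     You can assume that "word" is a string of nothing but lowercase letters.
--     >>> longest_leftmost_sequence_of_consecutive_letters('')
--     ''
--     >>> longest_leftmost_sequence_of_consecutive_letters('a')
--     'a'
--     >>> longest_leftmost_sequence_of_consecutive_letters('zuba')
--     'z'
--     >>> longest_leftmost_sequence_of_consecutive_letters('ab')
--     'ab'
--     >>> longest_leftmost_sequence_of_consecutive_letters('bcab')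
--     'bc'
--     >>> longest_leftmost_sequence_of_consecutive_letters('aabbccddee')
--     'ab'
--     >>> longest_leftmost_sequence_of_consecutive_letters('aefbxyzcrsdt')
--     'xyz'
--     >>> longest_leftmost_sequence_of_consecutive_letters('efghuvwijlrstuvabcde')
--     'rstuv'
--     '''
--     str = ''
--     max_len_str = ''
--
--     for index in range(len(word)):
--         str = word[index]
--         str = find_longest_len(index, word, str)
--         if len(str) > len(max_len_str):
--             max_len_str = str
--
--     return max_len_str
--
-- def find_longest_len(index, word, str):
--     if index + 1 < len(word):
--         if ord(word[index]) == ord(word[index + 1]) - 1: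
--             str = str + word[index + 1]
--             str = find_longest_len(index + 1, word, str)
--     return str
-- ===== SOURCE B (Python) =====
-- def longest_leftmost_sequence_of_consecutive_letters(word):
--     # Single right-to-left pass: `cur` is the consecutive run starting at the
--     # current position; keep the leftmost longest by updating on >=.
--     best = ''
--     cur = ''
--     for ch in reversed(word):
--         if cur and ord(ch) + 1 == ord(cur[0]):
--             cur = ch + cur
--         else:
--             cur = ch
--         if len(cur) >= len(best):
--             best = cur
--     return best
-- ===== Notes on version B (the rewrite author's own statement) =====
-- stated objective: faster
-- what changed: Replaces A's per-index recursive re-extension of the run starting at every position (rescanning each run once per member) by a single right-to-left sweep that maintains the current consecutive run and keeps the leftmost longest via a >= update.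
import Mathlib
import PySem

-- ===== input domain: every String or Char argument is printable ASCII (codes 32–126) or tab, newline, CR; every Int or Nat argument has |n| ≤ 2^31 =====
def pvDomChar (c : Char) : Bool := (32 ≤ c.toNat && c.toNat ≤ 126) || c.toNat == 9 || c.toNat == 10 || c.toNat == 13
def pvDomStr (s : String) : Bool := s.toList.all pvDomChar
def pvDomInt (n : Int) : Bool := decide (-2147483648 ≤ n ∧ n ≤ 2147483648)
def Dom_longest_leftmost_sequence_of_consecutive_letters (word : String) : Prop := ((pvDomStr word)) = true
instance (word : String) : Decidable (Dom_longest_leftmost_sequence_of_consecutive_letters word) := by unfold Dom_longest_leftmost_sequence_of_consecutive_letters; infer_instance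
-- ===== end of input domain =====

-- B replaces A's per-index recursive re-extension by one right-to-left pass that
-- maintains the current run and the leftmost best (objective: faster single pass).

-- ===== PORT A =====
-- find_longest_len: recursion on index; word[index] is safe (index+1 < len guard / caller index < len)
def findLongestLen (index : Nat) (w : List Char) (s : List Char) : List Char :=
  if h : index + 1 < w.length then
    if ((w.getD index ' ').toNat : Int) = ((w.getD (index + 1) ' ').toNat : Int) - 1 then
      findLongestLen (index + 1) w (s ++ [w.getD (index + 1) ' '])
    else s
  else s
termination_by w.length - index
decreasing_by omega

def longest_leftmost_sequence_of_consecutive_letters (word : String) : String :=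
  String.mk ((List.range word.toList.length).foldl (fun maxLenStr index =>
    let s := [word.toList.getD index ' ']          -- str = word[index]  (index < len(word))
    let s := findLongestLen index word.toList s
    if s.length > maxLenStr.length then s else maxLenStr) [])

-- ===== PORT B =====
-- state (best, cur); one step of the reversed loop of Source B
def altStep (c : Char) (st : List Char × List Char) : List Char × List Char :=
  let cur := match st.2 with
    | [] => [c]
    | h :: t => if c.toNat + 1 = h.toNat then c :: h :: t else [c]
  (if st.1.length ≤ cur.length then cur else st.1, cur)

def longest_leftmost_sequence_of_consecutive_letters_alt (word : String) : String :=
  String.mk ((word.toList.foldr altStep ([], [])).1)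

-- ===== PRECONDITION & SPEC =====
def Spec_longest_leftmost_sequence_of_consecutive_letters (word : String) (out : String) : Prop := out = longest_leftmost_sequence_of_consecutive_letters_alt word
instance (word : String) (out : String) : Decidable (Spec_longest_leftmost_sequence_of_consecutive_letters word out) := by unfold Spec_longest_leftmost_sequence_of_consecutive_letters; infer_instance

-- ===== CLAIM (what is proved, stated in full; the proofs are below) =====
def Claim_equal_longest_leftmost_sequence_of_consecutive_letters : Prop := ∀ (word : String), Dom_longest_leftmost_sequence_of_consecutive_letters word → Spec_longest_leftmost_sequence_of_consecutive_letters word (longest_leftmost_sequence_of_consecutive_letters word)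

-- ===== LEMMAS AND PROOFS =====

-- the maximal consecutive prefix of a list of characters
def runOf : List Char → List Char
  | [] => []
  | [a] => [a]
  | a :: b :: t => if a.toNat + 1 = b.toNat then a :: runOf (b :: t) else [a]

-- A's candidate list: runOf of every suffix, left to right
def cands : List Char → List (List Char)
  | [] => []
  | c :: t => runOf (c :: t) :: cands t

-- leftmost longest of a candidate list
def lmax : List (List Char) → List Char
  | [] => []
  | x :: xs => if (lmax xs).length ≤ x.length then x else lmax xs

-- A's update rule
def upd (m s : List Char) : List Char := if s.length > m.length then s else m

theorem runOf_cons (a : Char) (t : List Char) :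
    runOf (a :: t) = a :: (runOf (a :: t)).tail := by
  cases t with
  | nil => simp [runOf]
  | cons b t' => simp only [runOf]; split <;> simp

theorem runOf_tail_short (l : List Char) (h : l.length ≤ 1) : (runOf l).tail = [] := by
  match l, h with
  | [], _ => simp [runOf]
  | [a], _ => simp [runOf]

theorem findLongestLen_eq (index : Nat) (w : List Char) (s : List Char) :
    findLongestLen index w s = s ++ (runOf (w.drop index)).tail := by
  induction index, s using findLongestLen.induct w with
  | case1 index s h hc ih =>
    have hi : index < w.length := by omega
    have hd1 : w.drop index = w[index] :: w.drop (index + 1) := List.drop_eq_getElem_cons hi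
    have hd2 : w.drop (index + 1) = w[index + 1] :: w.drop (index + 2) := List.drop_eq_getElem_cons h
    have hg1 : w.getD index ' ' = w[index] := List.getD_eq_getElem w ' ' hi
    have hg2 : w.getD (index + 1) ' ' = w[index + 1] := List.getD_eq_getElem w ' ' h
    have hchain : (w[index]).toNat + 1 = (w[index + 1]).toNat := by
      rw [hg1, hg2] at hc; omega
    have ht : (runOf (List.drop index w)).tail = runOf (List.drop (index + 1) w) := by
      rw [hd1, hd2, runOf, if_pos hchain, ← hd2, List.tail_cons]
    have hr := runOf_cons (w[index + 1]) (w.drop (index + 2))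
    rw [← hd2] at hr
    rw [findLongestLen, dif_pos h, if_pos hc, ih, ht, hg2]
    conv_rhs => rw [hr]
    simp
  | case2 index s h hc =>
    have hi : index < w.length := by omega
    have hd1 : w.drop index = w[index] :: w.drop (index + 1) := List.drop_eq_getElem_cons hi
    have hd2 : w.drop (index + 1) = w[index + 1] :: w.drop (index + 2) := List.drop_eq_getElem_cons h
    have hg1 : w.getD index ' ' = w[index] := List.getD_eq_getElem w ' ' hi
    have hg2 : w.getD (index + 1) ' ' = w[index + 1] := List.getD_eq_getElem w ' ' h
    have hchain : ¬ ((w[index]).toNat + 1 = (w[index + 1]).toNat) := by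
      rw [hg1, hg2] at hc; omega
    rw [findLongestLen, dif_pos h, if_neg hc]
    rw [hd1, hd2, runOf, if_neg hchain]
    simp
  | case3 index s h =>
    rw [findLongestLen, dif_neg h]
    have : (w.drop index).length ≤ 1 := by simp; omega
    rw [runOf_tail_short _ this]; simp

theorem foldl_congr_mem'' {α β : Type} (l : List α) (f g : β → α → β) (a : β)
    (h : ∀ b x, x ∈ l → f b x = g b x) : l.foldl f a = l.foldl g a := by
  induction l generalizing a with
  | nil => rfl
  | cons x xs ih =>
    simp only [List.foldl_cons]
    rw [h a x (by simp), ih _ (fun b y hy => h b y (by simp [hy]))]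

theorem rangeFold_eq_candsFold (w : List Char) (acc : List Char) :
    (List.range w.length).foldl (fun m i => upd m (runOf (w.drop i))) acc
      = (cands w).foldl upd acc := by
  induction w generalizing acc with
  | nil => rfl
  | cons c t ih =>
    rw [List.length_cons, List.range_succ_eq_map, List.foldl_cons, List.foldl_map]
    simp only [List.drop_zero, List.drop_succ_cons]
    rw [ih]
    rfl

theorem portA_eq_candsFold (w : List Char) :
    (List.range w.length).foldl (fun maxLenStr index =>
      let s := [w.getD index ' ']
      let s := findLongestLen index w s
      if s.length > maxLenStr.length then s else maxLenStr) []
    = (cands w).foldl upd [] := by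
  rw [← rangeFold_eq_candsFold]
  apply foldl_congr_mem''
  intro b i hi
  have hlt : i < w.length := List.mem_range.mp hi
  have hd : w.drop i = w[i] :: w.drop (i + 1) := List.drop_eq_getElem_cons hlt
  have hg : w.getD i ' ' = w[i] := List.getD_eq_getElem w ' ' hlt
  simp only [findLongestLen_eq, upd, hg]
  have h1 : runOf (w.drop i) = w[i] :: (runOf (w.drop i)).tail := by
    rw [hd, ← runOf_cons]
  have h2 : [w[i]] ++ (runOf (w.drop i)).tail = runOf (w.drop i) := by
    conv_rhs => rw [h1]
    simp
  rw [h2]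

theorem candsFold_eq_lmax (cs : List (List Char)) (acc : List Char) :
    cs.foldl upd acc = if acc.length < (lmax cs).length then lmax cs else acc := by
  induction cs generalizing acc with
  | nil => simp [lmax]
  | cons x xs ih =>
    rw [List.foldl_cons, ih]
    simp only [lmax, upd]
    split_ifs <;> first | rfl | omega

theorem foldr_altStep_eq (l : List Char) :
    l.foldr altStep ([], []) = (lmax (cands l), runOf l) := by
  induction l with
  | nil => simp [cands, lmax, runOf]
  | cons c t ih =>
    rw [List.foldr_cons, ih]
    have hcur : (match runOf t with
        | [] => [c]
        | h :: t' => if c.toNat + 1 = h.toNat then c :: h :: t' else [c]) = runOf (c :: t) := by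
      cases t with
      | nil => simp [runOf]
      | cons b t' =>
        rw [runOf_cons b t']
        simp only [runOf]
        split
        · rw [← runOf_cons]
        · rfl
    simp only [altStep, hcur]
    rfl

theorem main_eq (w : List Char) :
    (List.range w.length).foldl (fun maxLenStr index =>
      let s := [w.getD index ' ']
      let s := findLongestLen index w s
      if s.length > maxLenStr.length then s else maxLenStr) []
    = (w.foldr altStep ([], [])).1 := by
  rw [portA_eq_candsFold, candsFold_eq_lmax, foldr_altStep_eq]
  by_cases h : ([] : List Char).length < (lmax (cands w)).length
  · rw [if_pos h]
  · rw [if_neg h]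
    simp only [List.length_nil, Nat.not_lt, Nat.le_zero] at h
    exact (List.eq_nil_of_length_eq_zero h).symm

-- ===== VERDICT (by name: the statement is the Claim_ definition above) =====
theorem longest_leftmost_sequence_of_consecutive_letters_spec : Claim_equal_longest_leftmost_sequence_of_consecutive_letters := by
  intro word _
  unfold Spec_longest_leftmost_sequence_of_consecutive_letters
  unfold longest_leftmost_sequence_of_consecutive_letters longest_leftmost_sequence_of_consecutive_letters_alt
  exact congrArg String.mk (main_eq word.toList)
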